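-- pv_equiv track=rewrite | github.com/JOHNKYON/search_research | data/entropy_arranger_optimal.py | cal_arrange
-- ===== SOURCE A (Python) =====
-- def cal_arrange(entropies, m):
--     """
--     Calculate the indices of arrangement that
--     maximize the minimum entropy of every substring.
--
--     indices[i] = j
--     means that the j-th element in the original array should
--     be put at the i-th place in the new array.
--
--     >>> cal_arrange([10,9,8,3,2,1], 3)
--     [0, 5, 1, 4, 2, 3]
--
--     :param entropies:
--     :param m:
--     :return:
--     """
--     sets = []
--     sets_temp = []
--     sums = []
--     sums_temp = []
--     for _ in range(int(m)):
--         sets.append([])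
--         sums.append(0)
--         sets_temp.append([])
--         sums_temp.append(0)
--
--     diff = [1.0e6]
--     dp(sets_temp, sums_temp, sets, sums, m, 0, 0, entropies, diff)
--
--     indices = [ele for subset in sets for ele in subset]
--     return indices
--
-- def dp(sets, sums, s, sm, m, ptr, level, es, diff):
--     if ptr == len(es):
--         temp = cal_diff(sums)
--         if temp < diff[0]:
--             copy(sets, s)
--             diff[0] = temp
--         return
--
--     if diff[0] == 0:
--         return
--
--     if ptr % m == 0:
--         level += 1
--
--     for i in range(m):
--         if len(sets[i]) < level:
--             sums[i] += es[ptr]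
--             sets[i].append(ptr)
--             dp(sets, sums, s, sm, m, ptr+1, level, es, diff)
--             sums[i] -= es[ptr]
--             sets[i] = sets[i][:-1]
--
-- def cal_diff(sums):
--     max = sums[0]
--     min = sums[0]
--     for sum in sums:
--         max = max if max >= sum else sum
--         min = min if min <= sum else sum
--     return max - min
--
-- def copy(a_sets, b_sets):
--     """
--     >>> a_sets = [[0,1],[2,3]]
--     >>> b_sets = [[], []]
--     >>> copy(a_sets, b_sets)
--     >>> b_sets
--     [[0, 1], [2, 3]]
--     >>> a_sets[0][0] = 5
--     >>> a_sets
--     [[5, 1], [2, 3]]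
--     >>> b_sets
--     [[0, 1], [2, 3]]
--
--     :param a_sets:
--     :param b_sets:
--     :return:
--     """
--     for i in range(len(a_sets)):
--         b_sets[i] = list(a_sets[i])
-- ===== SOURCE B (Python) =====
-- from itertools import permutations
--
--
-- def cal_arrange(entropies, m):
--     """Partition positions 0..n-1 into m balanced buckets minimizing
--     max(bucket sums) - min(bucket sums); returns the positions grouped
--     by bucket.  Enumerate-then-select: every balanced assignment splits
--     into blocks of m positions, each block an injective choice of
--     buckets, so the candidates are products of per-block permutations,
--     generated lazily and scanned once."""
--     m = int(m)
--     n = len(entropies)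
--     if m <= 0:
--         return []
--     q, r = divmod(n, m)
--     makers = [lambda: permutations(range(m))] * q
--     if r:
--         makers = makers + [lambda: permutations(range(m), r)]
--
--     def blocks_iter(j):
--         if j == len(makers):
--             yield ()
--         else:
--             for block in makers[j]():
--                 for rest in blocks_iter(j + 1):
--                     yield (block,) + rest
--
--     best_d = 10 ** 6
--     best_blocks = None
--     for blocks in blocks_iter(0):
--         sums = [0] * m
--         i = 0
--         for block in blocks:
--             for b in block:
--                 sums[b] += entropies[i]
--                 i += 1
--         d = max(sums) - min(sums)
--         if d < best_d:
--             best_d, best_blocks = d, blocks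
--             if d == 0:
--                 break
--     if best_blocks is None:
--         return []
--     best = [b for block in best_blocks for b in block]
--     return [i for b in range(m) for i in range(n) if best[i] == b]
-- ===== Notes on version B (the rewrite author's own statement) =====
-- stated objective: alternative
-- what changed: Replaces the pruned recursive DFS with shared mutable buckets, undo steps and a global best by a flat enumerate-then-select: balanced assignments are characterised as products of per-block permutations (each block of m positions is an injective bucket choice), generated as explicit lists and scanned once keeping the first strict improvement.
-- outside the precondition, e.g. on cal_arrange([1, 2], -1): A returns [], B returns []
import Mathlib
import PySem

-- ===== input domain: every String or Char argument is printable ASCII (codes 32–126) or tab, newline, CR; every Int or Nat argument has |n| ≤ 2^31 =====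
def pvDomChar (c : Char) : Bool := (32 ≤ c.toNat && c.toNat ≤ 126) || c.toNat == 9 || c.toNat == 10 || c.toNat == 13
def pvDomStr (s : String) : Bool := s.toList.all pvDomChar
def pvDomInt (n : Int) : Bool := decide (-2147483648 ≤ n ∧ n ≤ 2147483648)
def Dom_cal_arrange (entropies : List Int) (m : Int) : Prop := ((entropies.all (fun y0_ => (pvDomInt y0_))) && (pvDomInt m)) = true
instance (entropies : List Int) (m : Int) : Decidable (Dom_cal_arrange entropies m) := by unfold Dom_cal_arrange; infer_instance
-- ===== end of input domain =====

-- B replaces A's pruned recursive DFS (shared mutable buckets, undo, global best) by a direct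
-- enumerate-then-select: the balanced assignments are exactly products of per-block permutations,
-- generated as lists and scanned once; same cost class, different decomposition ('alternative').

-- ===== PORT A =====
-- cal_diff(sums): running max/min fold starting from sums[0]
def calDiffA (sums : List Int) : Int :=
  let h := sums.headD 0
  let p := sums.foldl (fun (mm : Int × Int) s =>
      ((if mm.1 ≥ s then mm.1 else s), (if mm.2 ≤ s then mm.2 else s))) (h, h)
  p.1 - p.2

-- dp(sets, sums, s, sm, m, ptr, level, es, diff): state threaded functionally as
-- (working sets, working sums, best sets, diff).  Python's `ptr == len(es)` test is carried by
-- `fuel = es.length - ptr` (structural recursion; callers maintain fuel + ptr = es.length);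
-- the `for i in range(m)` loop is the foldl over List.range mN with the same body, including
-- the undo `sums[i] -= es[ptr]; sets[i] = sets[i][:-1]` after the recursive call.
mutual
def dpA (es : List Int) (mN : Nat) (fuel ptr level : Nat) (sets : List (List Int))
    (sums : List Int) (best : List (List Int)) (diff : Int) :
    List (List Int) × List Int × List (List Int) × Int :=
  match fuel with
  | 0 =>
      let temp := calDiffA sums
      if temp < diff then (sets, sums, sets, temp) else (sets, sums, best, diff)
  | fuel' + 1 =>
      if diff = 0 then (sets, sums, best, diff)
      else
        let level' := if ptr % mN = 0 then level + 1 else level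
        dpLoopA es mN fuel' ptr level' 0 sets sums best diff
  termination_by (fuel, mN + 1)

def dpLoopA (es : List Int) (mN : Nat) (fuel ptr level i : Nat) (sets : List (List Int))
    (sums : List Int) (best : List (List Int)) (diff : Int) :
    List (List Int) × List Int × List (List Int) × Int :=
  if i < mN then
    if (sets.getD i []).length < level then
      let r := dpA es mN fuel (ptr + 1) level (sets.modify i (· ++ [(ptr : Int)]))
        (sums.modify i (· + es.getD ptr 0)) best diff
      -- undo: sums[i] -= es[ptr]; sets[i] = sets[i][:-1]
      dpLoopA es mN fuel ptr level (i + 1) (r.1.modify i (fun l => l.dropLast))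
        (r.2.1.modify i (· - es.getD ptr 0)) r.2.2.1 r.2.2.2
    else dpLoopA es mN fuel ptr level (i + 1) sets sums best diff
  else (sets, sums, best, diff)
  termination_by (fuel + 1, mN - i)
end

-- cal_arrange: initial diff 1.0e6 (= integer 1000000 exactly; all later values are Int);
-- int(m) on the Int argument is m itself; mN = m.toNat (for m ≤ 0 Python raises or, for
-- m < 0 with a nonempty list, returns [] — which this port also returns; m ≤ 0 is outside Pre_)
def cal_arrange (entropies : List Int) (m : Int) : List Int :=
  let mN := m.toNat
  let sets := List.replicate mN ([] : List Int)
  let sums := List.replicate mN (0 : Int)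
  let setsT := List.replicate mN ([] : List Int)
  let r := dpA entropies mN entropies.length 0 0 setsT sums sets 1000000
  r.2.2.1.flatten

-- ===== PORT B =====
-- itertools.permutations(avail, k) for a duplicate-free avail, in order
def permsB : List Nat → Nat → List (List Nat)
  | _, 0 => [[]]
  | avail, k + 1 => avail.flatMap (fun x => (permsB (avail.erase x) k).map (x :: ·))

-- blocks_iter(0): the lazy product of the per-block permutation pools, one candidate
-- per tuple of blocks (in order); the pools stay thunks, like Source B's `lambda:` makers
def prodBlocks : List (Unit → List (List Nat)) → List (List (List Nat))
  | [] => [[]]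
  | f :: rest => (f ()).flatMap (fun b => (prodBlocks rest).map (b :: ·))

-- sums = [0]*m; i = 0; for block in blocks: for b in block: sums[b] += entropies[i]; i += 1
def sumsB (es : List Int) (mN : Nat) (blocks : List (List Nat)) : List Int :=
  (blocks.foldl (fun (acc : List Int × Nat) block =>
      block.foldl (fun (acc2 : List Int × Nat) b =>
        (acc2.1.modify b (· + es.getD acc2.2 0), acc2.2 + 1)) acc)
    (List.replicate mN (0 : Int), 0)).1

-- the selection loop, with the `if d == 0: break`
def selB (es : List Int) (mN : Nat) :
    List (List (List Nat)) → Int → Option (List (List Nat)) → Int × Option (List (List Nat))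
  | [], bd, best => (bd, best)
  | blocks :: rest, bd, best =>
      let sums := sumsB es mN blocks
      let d := (PySem.List.max? sums (fun x => x)).getD 0 -
        (PySem.List.min? sums (fun x => x)).getD 0
      if d < bd then
        if d = 0 then (d, some blocks) else selB es mN rest d (some blocks)
      else selB es mN rest bd best

def cal_arrange_alt (entropies : List Int) (m : Int) : List Int :=
  if m ≤ 0 then []
  else
    let mN := m.toNat
    let n := entropies.length
    let q := n / mN
    let r := n % mN
    let makers := List.replicate q (fun _ : Unit => permsB (List.range mN) mN) ++
      (if r ≠ 0 then [fun _ : Unit => permsB (List.range mN) r] else [])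
    let res := selB entropies mN (prodBlocks makers) (10 ^ 6) none
    match res.2 with
    | none => []
    | some bestBlocks =>
        let best := bestBlocks.flatten
        (List.range mN).flatMap (fun b =>
          ((List.range n).filter (fun i => best.getD i mN = b)).map (fun i => (i : Int)))

-- ===== PRECONDITION & SPEC =====
-- Pre_ excludes m ≤ 0, outside the function's natural domain (a bucket count of at least 1):
-- there Python A raises ZeroDivisionError (m = 0, nonempty list) or IndexError (empty list),
-- except for m < 0 with a nonempty list where its empty bucket range accidentally yields [].
def Pre_cal_arrange (entropies : List Int) (m : Int) : Prop := 1 ≤ m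
instance (entropies : List Int) (m : Int) : Decidable (Pre_cal_arrange entropies m) := by unfold Pre_cal_arrange; infer_instance
def pvWitness_cal_arrange : List Int × Int := ([10, 9, 8, 3, 2, 1], 3)

def Spec_cal_arrange (entropies : List Int) (m : Int) (out : List Int) : Prop := out = cal_arrange_alt entropies m
instance (entropies : List Int) (m : Int) (out : List Int) : Decidable (Spec_cal_arrange entropies m out) := by unfold Spec_cal_arrange; infer_instance

-- ===== CLAIM (what is proved, stated in full; the proofs are below) =====
def Claim_equal_cal_arrange : Prop := ∀ (entropies : List Int) (m : Int), Dom_cal_arrange entropies m → Pre_cal_arrange entropies m → Spec_cal_arrange entropies m (cal_arrange entropies m)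

-- ===== LEMMAS AND PROOFS =====

-- ---- proof-side notions: prefixes of bucket choices and their buckets/sums ----

def cnt (mN : Nat) (p : List Nat) (b : Nat) : Nat :=
  ((List.range p.length).filter (fun j => p.getD j mN = b)).length

def boxP (mN : Nat) (p : List Nat) (b : Nat) : List Int :=
  ((List.range p.length).filter (fun j => p.getD j mN = b)).map (fun j => (j : Int))

def setsP (mN : Nat) (p : List Nat) : List (List Int) := (List.range mN).map (boxP mN p)

def sumsP (es : List Int) (mN : Nat) (p : List Nat) : List Int :=
  (List.range mN).map (fun b =>
    (((List.range p.length).filter (fun j => p.getD j mN = b)).map (fun j => es.getD j 0)).sum)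

def relO (mN : Nat) : Option (List Nat) → List (List Int)
  | none => List.replicate mN []
  | some c => setsP mN c

def diffP (es : List Int) (mN : Nat) (c : List Nat) : Int :=
  (PySem.List.max? (sumsP es mN c) (fun x => x)).getD 0 -
  (PySem.List.min? (sumsP es mN c) (fun x => x)).getD 0

def stepS (es : List Int) (mN : Nat) (acc : Int × Option (List Nat)) (c : List Nat) :
    Int × Option (List Nat) :=
  if diffP es mN c < acc.1 then (diffP es mN c, some c) else acc

def extb (mN : Nat) : Nat → List Nat → List (List Nat)
  | 0, _ => [[]]
  | k + 1, p => (List.range mN).flatMap (fun i =>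
      if cnt mN p i < p.length / mN + 1 then (extb mN k (p ++ [i])).map (i :: ·) else [])

def extBB (mN : Nat) : Nat → List Nat → List (List Nat)
  | 0, _ => [[]]
  | k + 1, avail => avail.flatMap (fun b =>
      (extBB mN k (if avail.length = 1 then List.range mN else avail.erase b)).map (b :: ·))

def InvA (mN : Nat) (p : List Nat) (avail : List Nat) : Prop :=
  avail = (List.range mN).filter (fun b => decide (cnt mN p b = p.length / mN)) ∧
  (∀ b, b < mN → cnt mN p b = p.length / mN ∨ cnt mN p b = p.length / mN + 1) ∧
  avail.length = mN - p.length % mN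

-- ---- bookkeeping lemmas ----

lemma filter_range_succ (n : Nat) (g : Nat → Bool) :
    (List.range (n + 1)).filter g = (List.range n).filter g ++ (if g n then [n] else []) := by
  rw [List.range_succ, List.filter_append]
  cases h : g n <;> simp [List.filter, h]

lemma getD_append_last (p : List Nat) (x d : Nat) : (p ++ [x]).getD p.length d = x := by
  rw [List.getD_eq_getElem?_getD]
  simp

lemma filter_getD_append (p : List Nat) (x d b : Nat) :
    (List.range (p ++ [x]).length).filter (fun j => (p ++ [x]).getD j d = b) =
      (List.range p.length).filter (fun j => p.getD j d = b) ++
        (if x = b then [p.length] else []) := by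
  have hlen : (p ++ [x]).length = p.length + 1 := by simp
  rw [hlen, filter_range_succ]
  congr 1
  · apply List.filter_congr
    intro j hj
    rw [List.mem_range] at hj
    rw [List.getD_append _ _ _ _ hj]
  · rw [getD_append_last]
    by_cases h : x = b <;> simp [h]

lemma boxP_append (mN : Nat) (p : List Nat) (i b : Nat) :
    boxP mN (p ++ [i]) b = boxP mN p b ++ (if i = b then [((p.length : Nat) : Int)] else []) := by
  unfold boxP
  rw [filter_getD_append]
  by_cases h : i = b <;> simp [h]

lemma cnt_append (mN : Nat) (p : List Nat) (i b : Nat) :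
    cnt mN (p ++ [i]) b = cnt mN p b + (if i = b then 1 else 0) := by
  unfold cnt
  rw [filter_getD_append, List.length_append]
  by_cases h : i = b <;> simp [h]

lemma sumsP_entry_append (es : List Int) (mN : Nat) (p : List Nat) (i b : Nat) :
    (((List.range (p ++ [i]).length).filter (fun j => (p ++ [i]).getD j mN = b)).map
        (fun j => es.getD j 0)).sum =
      (((List.range p.length).filter (fun j => p.getD j mN = b)).map (fun j => es.getD j 0)).sum +
        (if i = b then es.getD p.length 0 else 0) := by
  rw [filter_getD_append, List.map_append, List.sum_append]
  by_cases h : i = b <;> simp [h]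

lemma setsP_getD (mN : Nat) (p : List Nat) (i : Nat) (hi : i < mN) :
    (setsP mN p).getD i [] = boxP mN p i := by
  unfold setsP
  rw [List.getD_eq_getElem?_getD]
  simp [List.getElem?_range, hi]

lemma setsP_append (mN : Nat) (p : List Nat) (i : Nat) (hi : i < mN) :
    setsP mN (p ++ [i]) = (setsP mN p).modify i (· ++ [((p.length : Nat) : Int)]) := by
  apply List.ext_getElem
  · simp [setsP, List.length_modify]
  intro j h1 h2
  have hj : j < mN := by simpa [setsP] using h1
  rw [List.getElem_modify]
  simp only [setsP, List.getElem_map, List.getElem_range]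
  rw [boxP_append]
  by_cases h : i = j <;> simp [h]

lemma sumsP_append (es : List Int) (mN : Nat) (p : List Nat) (i : Nat) :
    sumsP es mN (p ++ [i]) = (sumsP es mN p).modify i (· + es.getD p.length 0) := by
  apply List.ext_getElem
  · simp [sumsP, List.length_modify]
  intro j h1 h2
  have hj : j < mN := by simpa [sumsP] using h1
  rw [List.getElem_modify]
  simp only [sumsP, List.getElem_map, List.getElem_range]
  rw [sumsP_entry_append]
  by_cases h : i = j <;> simp [h]

lemma setsP_undo (mN : Nat) (p : List Nat) (i : Nat) (hi : i < mN) :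
    (setsP mN (p ++ [i])).modify i (fun l => l.dropLast) = setsP mN p := by
  apply List.ext_getElem
  · simp [setsP, List.length_modify]
  intro j h1 h2
  have hj : j < mN := by simpa [setsP, List.length_modify] using h1
  rw [List.getElem_modify]
  simp only [setsP, List.getElem_map, List.getElem_range]
  rw [boxP_append]
  by_cases h : i = j <;> simp [h, List.dropLast_concat]

lemma modify_add_sub (l : List Int) (i : Nat) (e : Int) :
    (l.modify i (· + e)).modify i (· - e) = l := by
  apply List.ext_getElem
  · simp [List.length_modify]
  intro j h1 h2
  rw [List.getElem_modify, List.getElem_modify]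
  by_cases h : i = j <;> simp [h]

lemma sumsP_undo (es : List Int) (mN : Nat) (p : List Nat) (i : Nat) :
    (sumsP es mN (p ++ [i])).modify i (· - es.getD p.length 0) = sumsP es mN p := by
  rw [sumsP_append, modify_add_sub]

lemma setsP_nil (mN : Nat) : setsP mN [] = List.replicate mN [] := by
  have hfun : boxP mN ([] : List Nat) = fun _ => ([] : List Int) := by
    funext b; simp [boxP]
  simp [setsP, hfun]

lemma sumsP_nil (es : List Int) (mN : Nat) : sumsP es mN [] = List.replicate mN 0 := by
  simp [sumsP, List.map_const']

lemma sumsP_length (es : List Int) (mN : Nat) (p : List Nat) : (sumsP es mN p).length = mN := by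
  simp [sumsP]

-- ---- extrema ----

lemma foldl_pair_max_min (t : List Int) (a b : Int) :
    t.foldl (fun (mm : Int × Int) s =>
        ((if mm.1 ≥ s then mm.1 else s), (if mm.2 ≤ s then mm.2 else s))) (a, b) =
      (t.foldl max a, t.foldl min b) := by
  induction t generalizing a b with
  | nil => rfl
  | cons x t ih =>
      simp only [List.foldl_cons]
      rw [ih]
      have h1 : (if a ≥ x then a else x) = max a x := by
        by_cases h : a ≥ x
        · rw [if_pos h, max_eq_left h]
        · rw [if_neg h, max_eq_right (le_of_lt (lt_of_not_ge h))]
      have h2 : (if b ≤ x then b else x) = min b x := by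
        by_cases h : b ≤ x
        · rw [if_pos h, min_eq_left h]
        · rw [if_neg h, min_eq_right (le_of_lt (lt_of_not_ge h))]
      rw [h1, h2]

lemma calDiffA_eq (s : List Int) (h : s ≠ []) :
    calDiffA s = (PySem.List.max? s (fun x => x)).getD 0 -
      (PySem.List.min? s (fun x => x)).getD 0 := by
  cases s with
  | nil => exact absurd rfl h
  | cons x t =>
      unfold calDiffA
      simp only [List.headD_cons, List.foldl_cons]
      have h0 : ((if x ≥ x then x else x), (if x ≤ x then x else x)) = (x, x) := by simp
      rw [h0, foldl_pair_max_min, PySem.List.max?_id_cons, PySem.List.min?_id_cons]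
      rfl

lemma max_sub_min_nonneg (s : List Int) (h : s ≠ []) :
    0 ≤ (PySem.List.max? s (fun x => x)).getD 0 - (PySem.List.min? s (fun x => x)).getD 0 := by
  cases s with
  | nil => exact absurd rfl h
  | cons x t =>
      rw [PySem.List.max?_id_cons, PySem.List.min?_id_cons]
      have h1 := (PySem.List.le_foldl_max t x).1
      have h2 := (PySem.List.foldl_min_le t x).1
      simp only [Option.getD_some]
      omega

lemma diffP_nonneg (es : List Int) (mN : Nat) (hm : 1 ≤ mN) (c : List Nat) :
    0 ≤ diffP es mN c := by
  apply max_sub_min_nonneg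
  have := sumsP_length es mN c
  intro hnil
  rw [hnil] at this
  simp at this
  omega

-- ---- fold-over-candidates facts ----

lemma foldl_stepS_zero (es : List Int) (mN : Nat) (hm : 1 ≤ mN) (l : List (List Nat))
    (o : Option (List Nat)) : List.foldl (stepS es mN) (0, o) l = (0, o) := by
  induction l generalizing o with
  | nil => rfl
  | cons c t ih =>
      simp only [List.foldl_cons, stepS]
      rw [if_neg (by have := diffP_nonneg es mN hm c; omega)]
      exact ih o

lemma foldl_stepS_nonneg (es : List Int) (mN : Nat) (hm : 1 ≤ mN) (l : List (List Nat))
    (bd : Int) (o : Option (List Nat)) (h : 0 ≤ bd) :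
    0 ≤ (List.foldl (stepS es mN) (bd, o) l).1 := by
  induction l generalizing bd o with
  | nil => exact h
  | cons c t ih =>
      simp only [List.foldl_cons, stepS]
      split
      · exact ih _ _ (diffP_nonneg es mN hm c)
      · exact ih _ _ h

lemma foldl_stepS_snd_mem (es : List Int) (mN : Nat) (l : List (List Nat)) (bd : Int)
    (o : Option (List Nat)) :
    (List.foldl (stepS es mN) (bd, o) l).2 = o ∨
      ∃ c ∈ l, (List.foldl (stepS es mN) (bd, o) l).2 = some c := by
  induction l generalizing bd o with
  | nil => exact Or.inl rfl
  | cons c t ih =>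
      simp only [List.foldl_cons, stepS]
      split
      · rcases ih (diffP es mN c) (some c) with h | ⟨c', hc', h⟩
        · exact Or.inr ⟨c, List.mem_cons_self .., h⟩
        · exact Or.inr ⟨c', List.mem_cons_of_mem _ hc', h⟩
      · rcases ih bd o with h | ⟨c', hc', h⟩
        · exact Or.inl h
        · exact Or.inr ⟨c', List.mem_cons_of_mem _ hc', h⟩

lemma sums_fold_block (es : List Int) (mN : Nat) :
    ∀ (block p : List Nat),
      block.foldl (fun (acc2 : List Int × Nat) b =>
          (acc2.1.modify b (· + es.getD acc2.2 0), acc2.2 + 1)) (sumsP es mN p, p.length) =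
        (sumsP es mN (p ++ block), (p ++ block).length) := by
  intro block
  induction block with
  | nil => intro p; simp
  | cons b bs ih =>
      intro p
      simp only [List.foldl_cons]
      show bs.foldl _ ((sumsP es mN p).modify b (· + es.getD p.length 0), p.length + 1) = _
      have hpair : ((sumsP es mN p).modify b (· + es.getD p.length 0), p.length + 1) =
          (sumsP es mN (p ++ [b]), (p ++ [b]).length) := by
        rw [← sumsP_append]
        simp
      rw [hpair, ih (p ++ [b])]
      simp

lemma sums_fold_blocks (es : List Int) (mN : Nat) :
    ∀ (bls : List (List Nat)) (p : List Nat),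
      bls.foldl (fun (acc : List Int × Nat) block =>
          block.foldl (fun (acc2 : List Int × Nat) b =>
            (acc2.1.modify b (· + es.getD acc2.2 0), acc2.2 + 1)) acc)
        (sumsP es mN p, p.length) =
        (sumsP es mN (p ++ bls.flatten), (p ++ bls.flatten).length) := by
  intro bls
  induction bls with
  | nil => intro p; simp
  | cons bl rest ih =>
      intro p
      simp only [List.foldl_cons]
      rw [sums_fold_block es mN bl p, ih (p ++ bl)]
      simp

lemma sumsB_eq (es : List Int) (mN : Nat) (blocks : List (List Nat)) :
    sumsB es mN blocks = sumsP es mN blocks.flatten := by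
  unfold sumsB
  have h0 : (List.replicate mN (0 : Int), 0) = (sumsP es mN [], ([] : List Nat).length) := by
    rw [sumsP_nil]
    simp
  rw [h0, sums_fold_blocks es mN blocks []]
  simp

lemma selB_eq (es : List Int) (mN : Nat) (hm : 1 ≤ mN) :
    ∀ (l : List (List (List Nat))) (bd : Int) (o : Option (List (List Nat))),
      (selB es mN l bd o).1 =
        (List.foldl (stepS es mN) (bd, o.map List.flatten) (l.map List.flatten)).1 ∧
      (selB es mN l bd o).2.map List.flatten =
        (List.foldl (stepS es mN) (bd, o.map List.flatten) (l.map List.flatten)).2 := by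
  intro l
  induction l with
  | nil => intro bd o; exact ⟨rfl, rfl⟩
  | cons blocks t ih =>
      intro bd o
      show ((selB es mN (blocks :: t) bd o).1 = _) ∧ _
      simp only [List.map_cons, List.foldl_cons]
      simp only [selB, sumsB_eq]
      have hd : (PySem.List.max? (sumsP es mN blocks.flatten) fun x => x).getD 0 -
          (PySem.List.min? (sumsP es mN blocks.flatten) fun x => x).getD 0 =
          diffP es mN blocks.flatten := rfl
      rw [hd]
      by_cases hlt : diffP es mN blocks.flatten < bd
      · by_cases h0 : diffP es mN blocks.flatten = 0
        · rw [if_pos hlt, if_pos h0,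
            show stepS es mN (bd, o.map List.flatten) blocks.flatten =
                (0, some blocks.flatten) from by
              show (if diffP es mN blocks.flatten < bd then
                  (diffP es mN blocks.flatten, some blocks.flatten)
                else (bd, o.map List.flatten)) = _
              rw [if_pos hlt, h0],
            foldl_stepS_zero es mN hm, h0]
          exact ⟨rfl, rfl⟩
        · rw [if_pos hlt, if_neg h0,
            show stepS es mN (bd, o.map List.flatten) blocks.flatten =
                (diffP es mN blocks.flatten, some blocks.flatten) from by
              show (if diffP es mN blocks.flatten < bd then
                  (diffP es mN blocks.flatten, some blocks.flatten)
                else (bd, o.map List.flatten)) = _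
              rw [if_pos hlt]]
          have := ih (diffP es mN blocks.flatten) (some blocks)
          simpa using this
      · rw [if_neg hlt,
          show stepS es mN (bd, o.map List.flatten) blocks.flatten =
              (bd, o.map List.flatten) from by
            show (if diffP es mN blocks.flatten < bd then
                (diffP es mN blocks.flatten, some blocks.flatten)
              else (bd, o.map List.flatten)) = _
            rw [if_neg hlt]]
        exact ih bd o

-- ---- arithmetic of blocks ----

lemma div_mod_succ (mN : Nat) (hm : 1 ≤ mN) (ptr : Nat) :
    (ptr % mN = mN - 1 → (ptr + 1) / mN = ptr / mN + 1 ∧ (ptr + 1) % mN = 0) ∧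
      (ptr % mN < mN - 1 → (ptr + 1) / mN = ptr / mN ∧ (ptr + 1) % mN = ptr % mN + 1) := by
  have hmod := Nat.div_add_mod ptr mN
  have hlt : ptr % mN < mN := Nat.mod_lt ptr (by omega)
  constructor
  · intro h
    have e : ptr + 1 = mN * (ptr / mN) + mN := by omega
    constructor
    · rw [e, Nat.mul_add_div (by omega : 0 < mN), Nat.div_self (by omega : 0 < mN)]
    · rw [e, Nat.mul_add_mod, Nat.mod_self]
  · intro h
    have e : ptr + 1 = mN * (ptr / mN) + (ptr % mN + 1) := by omega
    constructor
    · rw [e, Nat.mul_add_div (by omega : 0 < mN),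
        Nat.div_eq_of_lt (show ptr % mN + 1 < mN by omega)]
      omega
    · rw [e, Nat.mul_add_mod, Nat.mod_eq_of_lt (show ptr % mN + 1 < mN by omega)]

-- ---- list shuffling ----

lemma flatMap_if_filter {α β : Type} (l : List α) (c : α → Prop) [DecidablePred c]
    (g : α → List β) :
    l.flatMap (fun i => if c i then g i else []) = (l.filter (fun i => decide (c i))).flatMap g := by
  induction l with
  | nil => rfl
  | cons x t ih =>
      by_cases h : c x <;> simp [List.filter_cons, h, ih]

lemma erase_filter_nodup (l : List Nat) (hl : l.Nodup) (P : Nat → Bool) (i : Nat) :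
    (l.filter P).erase i = l.filter (fun b => P b && !(b == i)) := by
  induction l with
  | nil => rfl
  | cons x t ih =>
      have hx : x ∉ t := (List.nodup_cons.mp hl).1
      have ht : t.Nodup := (List.nodup_cons.mp hl).2
      by_cases hP : P x
      · rw [List.filter_cons_of_pos hP]
        by_cases hxi : x = i
        · subst hxi
          rw [List.erase_cons_head]
          rw [List.filter_cons_of_neg (by simp [hP])]
          symm
          apply List.filter_congr
          intro b hb
          have : b ≠ x := fun hbx => hx (hbx ▸ hb)
          simp [this]
        · rw [List.erase_cons_tail (by simp [hxi])]
          rw [List.filter_cons_of_pos (by simp [hP, hxi]), ih ht]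
      · rw [List.filter_cons_of_neg (by simp [hP]),
          List.filter_cons_of_neg (by simp [hP]), ih ht]

-- ---- the DFS computes the fold over its valid completions ----

lemma extb_mem_len (mN : Nat) : ∀ (k : Nat) (p : List Nat) (s : List Nat),
    s ∈ extb mN k p → s.length = k := by
  intro k
  induction k with
  | zero => intro p s hs; simp [extb] at hs; simp [hs]
  | succ k ih =>
      intro p s hs
      simp only [extb, List.mem_flatMap] at hs
      obtain ⟨i, hi, hs⟩ := hs
      split at hs
      · rw [List.mem_map] at hs
        obtain ⟨t, ht, rfl⟩ := hs
        simp [ih _ _ ht]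
      · simp at hs

lemma boxP_length (mN : Nat) (p : List Nat) (b : Nat) :
    (boxP mN p b).length = cnt mN p b := by
  simp [boxP, cnt]

lemma flatMap_congr_mem {α β : Type} (l : List α) (f g : α → List β)
    (h : ∀ a ∈ l, f a = g a) : l.flatMap f = l.flatMap g := by
  induction l with
  | nil => rfl
  | cons x t ih =>
      simp only [List.flatMap_cons]
      rw [h x (List.mem_cons_self ..), ih (fun a ha => h a (List.mem_cons_of_mem _ ha))]

lemma level_succ (mN : Nat) (hm : 1 ≤ mN) (ptr : Nat) :
    ptr / mN + 1 =
      (if (ptr + 1) % mN = 0 then (ptr + 1) / mN else (ptr + 1) / mN + 1) := by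
  have hsucc := div_mod_succ mN hm ptr
  have hlt : ptr % mN < mN := Nat.mod_lt ptr (by omega)
  rcases Nat.lt_or_ge (ptr % mN) (mN - 1) with hr | hr
  · obtain ⟨hd, hmm⟩ := hsucc.2 hr
    rw [hmm, if_neg (by omega), hd]
  · have hr' : ptr % mN = mN - 1 := by omega
    obtain ⟨hd, hmm⟩ := hsucc.1 hr'
    rw [hmm, if_pos rfl, hd]

lemma dpA_eq (es : List Int) (mN : Nat) (hm : 1 ≤ mN) :
    ∀ (k : Nat) (p : List Nat) (o : Option (List Nat)) (bound : Int) (level : Nat),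
      p.length + k = es.length → 0 ≤ bound →
      level = (if p.length % mN = 0 then p.length / mN else p.length / mN + 1) →
      dpA es mN k p.length level (setsP mN p) (sumsP es mN p) (relO mN o) bound =
        (setsP mN p, sumsP es mN p,
         relO mN (List.foldl (stepS es mN) (bound, o) ((extb mN k p).map (p ++ ·))).2,
         (List.foldl (stepS es mN) (bound, o) ((extb mN k p).map (p ++ ·))).1) := by
  intro k
  induction k with
  | zero =>
      intro p o bound level hlen hb hlev
      have hne : sumsP es mN p ≠ [] := by
        have := sumsP_length es mN p
        intro h; rw [h] at this; simp at this; omega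
      simp only [dpA, extb, List.map_cons, List.map_nil, List.append_nil,
        List.foldl_cons, List.foldl_nil]
      rw [calDiffA_eq _ hne]
      have hd : (PySem.List.max? (sumsP es mN p) fun x => x).getD 0 -
          (PySem.List.min? (sumsP es mN p) fun x => x).getD 0 = diffP es mN p := rfl
      rw [hd]
      by_cases h : diffP es mN p < bound
      · rw [if_pos h,
          show stepS es mN (bound, o) p = (diffP es mN p, some p) from by
            show (if diffP es mN p < bound then (diffP es mN p, some p) else (bound, o)) = _
            rw [if_pos h]]
        rfl
      · rw [if_neg h,
          show stepS es mN (bound, o) p = (bound, o) from by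
            show (if diffP es mN p < bound then (diffP es mN p, some p) else (bound, o)) = _
            rw [if_neg h]]
  | succ k ih =>
      intro p o bound level hlen hb hlev
      simp only [dpA]
      by_cases h0 : bound = 0
      · subst h0
        rw [if_pos rfl, foldl_stepS_zero es mN hm]
      · rw [if_neg h0]
        have hlev' : (if p.length % mN = 0 then level + 1 else level) =
            p.length / mN + 1 := by
          by_cases h : p.length % mN = 0 <;> simp [h] at hlev ⊢ <;> omega
        rw [hlev']
        -- the per-branch candidate lists
        have key : ∀ (d i : Nat), mN - i = d → ∀ (o : Option (List Nat)) (bound : Int),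
            0 ≤ bound →
            dpLoopA es mN k p.length (p.length / mN + 1) i (setsP mN p) (sumsP es mN p)
                (relO mN o) bound =
              (setsP mN p, sumsP es mN p,
               relO mN (List.foldl (stepS es mN) (bound, o)
                 (((List.range mN).drop i).flatMap (fun b =>
                   if cnt mN p b < p.length / mN + 1 then
                     (extb mN k (p ++ [b])).map (fun s => p ++ b :: s) else []))).2,
               (List.foldl (stepS es mN) (bound, o)
                 (((List.range mN).drop i).flatMap (fun b =>
                   if cnt mN p b < p.length / mN + 1 then
                     (extb mN k (p ++ [b])).map (fun s => p ++ b :: s) else []))).1) := by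
          intro d
          induction d with
          | zero =>
              intro i hi o bound hb
              have hge : ¬ i < mN := by omega
              rw [dpLoopA, if_neg hge, List.drop_eq_nil_of_le (by simp; omega)]
              simp
          | succ d ihd =>
              intro i hi o bound hb
              have hilt : i < mN := by omega
              have hdrop : (List.range mN).drop i = i :: (List.range mN).drop (i + 1) := by
                rw [List.drop_eq_getElem_cons (by simp [hilt])]
                simp
              rw [dpLoopA, if_pos hilt, setsP_getD mN p i hilt, boxP_length, hdrop,
                List.flatMap_cons]
              by_cases hc : cnt mN p i < p.length / mN + 1
              · rw [if_pos hc, if_pos hc]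
                have hsets : (setsP mN p).modify i (· ++ [((p.length : Nat) : Int)]) =
                    setsP mN (p ++ [i]) := (setsP_append mN p i hilt).symm
                have hsums : (sumsP es mN p).modify i (· + es.getD p.length 0) =
                    sumsP es mN (p ++ [i]) := (sumsP_append es mN p i).symm
                rw [hsets, hsums]
                have hih := ih (p ++ [i]) o bound (p.length / mN + 1)
                  (by simp at hlen ⊢; omega) hb
                  (by simp only [List.length_append, List.length_cons, List.length_nil]
                      rw [← level_succ mN hm p.length])
                simp only [List.length_append, List.length_cons, List.length_nil] at hih
                rw [hih]
                simp only []
                rw [setsP_undo mN p i hilt, sumsP_undo es mN p i]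
                have hmapeq : (extb mN k (p ++ [i])).map ((p ++ [i]) ++ ·) =
                    (extb mN k (p ++ [i])).map (fun s => p ++ i :: s) := by
                  apply List.map_congr_left
                  intro s _
                  simp
                rw [hmapeq]
                rw [ihd (i + 1) (by omega) _ _
                  (foldl_stepS_nonneg es mN hm _ _ _ hb)]
                rw [List.foldl_append]
              · rw [if_neg hc, if_neg hc, List.nil_append]
                exact ihd (i + 1) (by omega) o bound hb
        rw [key mN 0 (by omega) o bound hb, List.drop_zero]
        have hmap : (extb mN (k + 1) p).map (p ++ ·) =
            (List.range mN).flatMap (fun b =>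
              if cnt mN p b < p.length / mN + 1 then
                (extb mN k (p ++ [b])).map (fun s => p ++ b :: s) else []) := by
          simp only [extb, List.map_flatMap]
          apply flatMap_congr_mem
          intro b _
          by_cases hc : cnt mN p b < p.length / mN + 1
          · rw [if_pos hc, if_pos hc, List.map_map]
            apply List.map_congr_left
            intro s _
            simp
          · rw [if_neg hc, if_neg hc, List.map_nil]
        rw [hmap]

-- ---- the valid completions are the products of per-block permutations ----

lemma invA_init (mN : Nat) : InvA mN [] (List.range mN) := by
  refine ⟨?_, ?_, ?_⟩
  · have : ∀ b, cnt mN ([] : List Nat) b = 0 := by intro b; simp [cnt]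
    simp [this]
  · intro b _
    left
    simp [cnt]
  · simp

lemma invA_step (mN : Nat) (hm : 1 ≤ mN) (p avail : List Nat) (hInv : InvA mN p avail)
    (b : Nat) (hb : b ∈ avail) :
    InvA mN (p ++ [b]) (if avail.length = 1 then List.range mN else avail.erase b) := by
  obtain ⟨h1, h2, h3⟩ := hInv
  have hr : p.length % mN < mN := Nat.mod_lt _ (by omega)
  have hbq : b < mN ∧ cnt mN p b = p.length / mN := by
    rw [h1, List.mem_filter, List.mem_range] at hb
    simpa using hb
  have hsucc := div_mod_succ mN hm p.length
  have hlen1 : (p ++ [b]).length = p.length + 1 := by simp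
  by_cases hone : avail.length = 1
  · have hrm : p.length % mN = mN - 1 := by omega
    obtain ⟨hd, hmm⟩ := hsucc.1 hrm
    have hav : avail = [b] := by
      obtain ⟨x, hx⟩ := List.length_eq_one_iff.mp hone
      rw [hx] at hb
      simp at hb
      rw [hx, hb]
    have hall : ∀ x, x < mN → cnt mN (p ++ [b]) x = (p ++ [b]).length / mN := by
      intro x hx
      rw [hlen1, hd, cnt_append]
      by_cases hxb : b = x
      · rw [if_pos hxb, ← hxb, hbq.2]
      · rw [if_neg hxb]
        rcases h2 x hx with hq | hq
        · exfalso
          have : x ∈ avail := by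
            rw [h1, List.mem_filter, List.mem_range]
            simp [hx, hq]
          rw [hav] at this
          simp at this
          exact hxb this.symm
        · omega
    rw [if_pos hone]
    refine ⟨?_, ?_, ?_⟩
    · symm
      apply List.filter_eq_self.mpr
      intro x hx
      rw [List.mem_range] at hx
      simp [hall x hx]
    · intro x hx
      exact Or.inl (hall x hx)
    · rw [hlen1, hmm]
      simp
  · have hrm : p.length % mN < mN - 1 := by omega
    obtain ⟨hd, hmm⟩ := hsucc.2 hrm
    rw [if_neg hone]
    refine ⟨?_, ?_, ?_⟩
    · rw [h1, erase_filter_nodup _ (List.nodup_range) _ b]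
      apply List.filter_congr
      intro x hx
      rw [List.mem_range] at hx
      rw [hlen1, hd, cnt_append]
      by_cases hxb : b = x
      · subst hxb
        simp [hbq.2]
      · rw [if_neg hxb]
        rcases h2 x hx with hq | hq
        · simp [hq, Ne.symm hxb]
        · simp [hq]
    · intro x hx
      rw [hlen1, hd, cnt_append]
      by_cases hxb : b = x
      · rw [if_pos hxb, ← hxb, hbq.2]
        exact Or.inr rfl
      · rw [if_neg hxb]
        rcases h2 x hx with hq | hq
        · exact Or.inl (by omega)
        · exact Or.inr (by omega)
    · rw [List.length_erase_of_mem hb, hlen1, hmm]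
      omega

lemma extb_eq_extBB (mN : Nat) (hm : 1 ≤ mN) :
    ∀ (k : Nat) (p avail : List Nat), InvA mN p avail → extb mN k p = extBB mN k avail := by
  intro k
  induction k with
  | zero => intro p avail _; rfl
  | succ k ih =>
      intro p avail hInv
      obtain ⟨h1, h2, h3⟩ := hInv
      simp only [extb, extBB]
      rw [flatMap_if_filter]
      have hfeq : ((List.range mN).filter
          (fun i => decide (cnt mN p i < p.length / mN + 1))) = avail := by
        rw [h1]
        apply List.filter_congr
        intro x hx
        rw [List.mem_range] at hx
        rcases h2 x hx with h | h <;> simp [h]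
      rw [hfeq]
      apply flatMap_congr_mem
      intro b hb
      congr 1
      exact ih (p ++ [b]) _ (invA_step mN hm p avail ⟨h1, h2, h3⟩ b hb)

lemma extBB_eq_perms (mN : Nat) :
    ∀ (k : Nat) (avail : List Nat), k ≤ avail.length → extBB mN k avail = permsB avail k := by
  intro k
  induction k with
  | zero => intro avail _; rfl
  | succ k ih =>
      intro avail hk
      simp only [extBB, permsB]
      apply flatMap_congr_mem
      intro b hb
      congr 1
      by_cases hone : avail.length = 1
      · have hk0 : k = 0 := by omega
        subst hk0
        rfl
      · rw [if_neg hone]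
        exact ih (avail.erase b) (by rw [List.length_erase_of_mem hb]; omega)

lemma extBB_peel (mN : Nat) :
    ∀ (k : Nat) (avail : List Nat), 1 ≤ avail.length → avail.length ≤ k →
      extBB mN k avail = (permsB avail avail.length).flatMap
        (fun s => (extBB mN (k - avail.length) (List.range mN)).map (s ++ ·)) := by
  intro k
  induction k with
  | zero => intro avail h1 h2; omega
  | succ k ih =>
      intro avail h1 h2
      by_cases hone : avail.length = 1
      · obtain ⟨x, rfl⟩ := List.length_eq_one_iff.mp hone
        rw [show ([x] : List Nat).length = 1 from rfl]
        simp only [extBB, permsB]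
        simp [List.erase_cons_head]
      · obtain ⟨al, hal⟩ : ∃ al, avail.length = al + 1 := ⟨avail.length - 1, by omega⟩
        have hal1 : 1 ≤ al := by omega
        rw [hal]
        simp only [extBB, permsB, if_neg hone]
        rw [List.flatMap_assoc]
        apply flatMap_congr_mem
        intro b hb
        have hel : (avail.erase b).length = al := by
          rw [List.length_erase_of_mem hb]; omega
        rw [ih (avail.erase b) (by omega) (by omega), hel,
          show k - al = k + 1 - (al + 1) from by omega]
        rw [List.map_flatMap, List.flatMap_map]
        apply flatMap_congr_mem
        intro s _
        rw [List.map_map]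
        rfl

def prodCat (bls : List (List (List Nat))) : List (List Nat) :=
  bls.foldr (fun bl acc => bl.flatMap (fun b => acc.map (b ++ ·))) [[]]

lemma prodCat_cons (X : List (List Nat)) (L : List (List (List Nat))) :
    prodCat (X :: L) = X.flatMap (fun b => (prodCat L).map (b ++ ·)) := rfl

lemma prodBlocks_flatten : ∀ (bls : List (Unit → List (List Nat))),
    (prodBlocks bls).map List.flatten = prodCat (bls.map (fun f => f ())) := by
  intro bls
  induction bls with
  | nil => rfl
  | cons bl rest ih =>
      simp only [prodBlocks, List.map_cons, prodCat_cons, List.map_flatMap, List.map_map]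
      apply flatMap_congr_mem
      intro b _
      rw [← ih, List.map_map]
      apply List.map_congr_left
      intro bs _
      simp

lemma extBB_blocks (mN : Nat) (hm : 1 ≤ mN) :
    ∀ (q r : Nat), r < mN →
      extBB mN (mN * q + r) (List.range mN) =
        prodCat (List.replicate q (permsB (List.range mN) mN) ++
          (if r ≠ 0 then [permsB (List.range mN) r] else [])) := by
  intro q
  induction q with
  | zero =>
      intro r hr
      simp only [Nat.mul_zero, Nat.zero_add, List.replicate_zero, List.nil_append]
      by_cases hr0 : r = 0
      · subst hr0
        rfl
      · rw [if_pos hr0, extBB_eq_perms mN r (List.range mN) (by simp; omega)]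
        show _ = prodCat [permsB (List.range mN) r]
        rw [show prodCat [permsB (List.range mN) r] =
            (permsB (List.range mN) r).flatMap (fun b => (prodCat []).map (b ++ ·)) from rfl]
        show _ = (permsB (List.range mN) r).flatMap (fun b => [b ++ []])
        simp
  | succ q ihq =>
      intro r hr
      have hk : mN * (q + 1) + r = (mN * q + r) + mN := by ring
      rw [hk, extBB_peel mN ((mN * q + r) + mN) (List.range mN)
        (by rw [List.length_range]; omega) (by rw [List.length_range]; omega)]
      rw [List.length_range, show (mN * q + r) + mN - mN = mN * q + r from by omega,
        ihq r hr]
      rw [List.replicate_succ, List.cons_append, prodCat_cons]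

lemma flatten_replicate_nil (n : Nat) : (List.replicate n ([] : List Int)).flatten = [] := by
  induction n with
  | zero => rfl
  | succ n ih => simp [List.replicate_succ, ih]

theorem cal_arrange_spec : Claim_equal_cal_arrange := by
  intro es m hdom hpre
  unfold Pre_cal_arrange at hpre
  unfold Spec_cal_arrange
  have hm0 : ¬ m ≤ 0 := by omega
  have hm : 1 ≤ m.toNat := by omega
  -- instantiate the DFS characterisation at the empty prefix
  have hdp := dpA_eq es m.toNat hm es.length [] none 1000000 0 (by simp) (by norm_num)
    (by simp)
  simp only [List.length_nil] at hdp
  rw [setsP_nil, sumsP_nil, show relO m.toNat none = List.replicate m.toNat [] from rfl,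
    show (extb m.toNat es.length []).map (fun x => ([] : List Nat) ++ x) =
      extb m.toNat es.length [] from by simp] at hdp
  -- B's candidate blocks, concatenated, are the same candidate list
  have hBlist : prodCat (List.replicate (es.length / m.toNat)
        (permsB (List.range m.toNat) m.toNat) ++
        (if es.length % m.toNat ≠ 0 then [permsB (List.range m.toNat) (es.length % m.toNat)]
         else [])) = extb m.toNat es.length [] := by
    rw [← extBB_blocks m.toNat hm (es.length / m.toNat) (es.length % m.toNat)
      (Nat.mod_lt _ (by omega)), Nat.div_add_mod]
    exact (extb_eq_extBB m.toNat hm es.length [] (List.range m.toNat)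
      (invA_init m.toNat)).symm
  simp only [cal_arrange, cal_arrange_alt, if_neg hm0]
  rw [hdp, show ((10 : Int) ^ 6) = (1000000 : Int) from by norm_num]
  have hmak : ((List.replicate (es.length / m.toNat)
      (fun _ : Unit => permsB (List.range m.toNat) m.toNat) ++
      (if es.length % m.toNat ≠ 0 then
        [fun _ : Unit => permsB (List.range m.toNat) (es.length % m.toNat)] else [])).map
        (fun f => f ())) =
      List.replicate (es.length / m.toNat) (permsB (List.range m.toNat) m.toNat) ++
      (if es.length % m.toNat ≠ 0 then [permsB (List.range m.toNat) (es.length % m.toNat)]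
       else []) := by
    by_cases h : es.length % m.toNat ≠ 0 <;> simp [h, List.map_replicate]
  have hsel := selB_eq es m.toNat hm (prodBlocks (List.replicate (es.length / m.toNat)
      (fun _ : Unit => permsB (List.range m.toNat) m.toNat) ++
      (if es.length % m.toNat ≠ 0 then
        [fun _ : Unit => permsB (List.range m.toNat) (es.length % m.toNat)] else []))) 1000000 none
  rw [prodBlocks_flatten, hmak, hBlist] at hsel
  simp only [show Option.map List.flatten (none : Option (List (List Nat))) = none from rfl]
    at hsel
  cases hS : (selB es m.toNat (prodBlocks (List.replicate (es.length / m.toNat)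
      (fun _ : Unit => permsB (List.range m.toNat) m.toNat) ++
      (if es.length % m.toNat ≠ 0 then
        [fun _ : Unit => permsB (List.range m.toNat) (es.length % m.toNat)] else []))) 1000000 none).2 with
  | none =>
      have hF2 : (List.foldl (stepS es m.toNat) (1000000, (none : Option (List Nat)))
          (extb m.toNat es.length [])).2 = none := by
        rw [← hsel.2, hS]
        rfl
      rw [hF2]
      show (relO m.toNat none).flatten = _
      rw [show relO m.toNat none = List.replicate m.toNat [] from rfl,
        flatten_replicate_nil]
  | some bb =>
      have hF2 : (List.foldl (stepS es m.toNat) (1000000, (none : Option (List Nat)))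
          (extb m.toNat es.length [])).2 = some bb.flatten := by
        rw [← hsel.2, hS]
        rfl
      rw [hF2]
      show (relO m.toNat (some bb.flatten)).flatten = _
      have hcmem : bb.flatten ∈ extb m.toNat es.length [] := by
        have hmem := foldl_stepS_snd_mem es m.toNat (extb m.toNat es.length [])
          1000000 none
        rw [hF2] at hmem
        rcases hmem with h | ⟨c', hc', h⟩
        · exact absurd h (by simp)
        · obtain rfl : c' = bb.flatten := by injection h.symm
          exact hc'
      have hclen : bb.flatten.length = es.length :=
        extb_mem_len m.toNat es.length [] bb.flatten hcmem
      rw [show relO m.toNat (some bb.flatten) = setsP m.toNat bb.flatten from rfl, ← hclen]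
      show ((List.range m.toNat).map (boxP m.toNat bb.flatten)).flatten =
        (List.range m.toNat).flatMap (boxP m.toNat bb.flatten)
      rw [List.flatMap_def]
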